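-- pv_equiv track=rewrite | github.com/franzoom/offline-liturgy | scripts/migrate_middle_of_day.py | find_insertion_point_after_psalmody
-- ===== SOURCE A (Python) =====
-- def find_insertion_point_after_psalmody(lines, mod_start, mod_end):
--     """Find where to insert tierce/sexte/none data after the psalmody sub-section."""
--     # Look for the end of the psalmody sub-section within middleOfDay
--     in_psalmody = False
--     last_psalmody_line = mod_start
--     for i in range(mod_start + 1, mod_end):
--         stripped = lines[i].strip()
--         if not stripped:
--             continue
--         indent = len(lines[i]) - len(lines[i].lstrip())
--         if stripped.startswith("psalmody:"):
--             in_psalmody = True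
--             last_psalmody_line = i
--         elif in_psalmody:
--             if indent <= 2 and not stripped.startswith("-") and not stripped.startswith("psalm:") and not stripped.startswith("antiphon:"):
--                 # We've exited psalmody, this is the insertion point
--                 return i
--             last_psalmody_line = i
--     return mod_end
-- ===== SOURCE B (Python) =====
-- def find_insertion_point_after_psalmody(lines, mod_start, mod_end):
--     """Find where to insert tierce/sexte/none data after the psalmody sub-section."""
--     def kind(i):
--         s = lines[i].strip()
--         if not s:
--             return "blank"
--         if s.startswith("psalmody:"):
--             return "psalmody"
--         indent = len(lines[i]) - len(lines[i].lstrip())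
--         if indent <= 2 and not s.startswith("-") and not s.startswith("psalm:") and not s.startswith("antiphon:"):
--             return "exit"
--         return "other"
--     idx = range(mod_start + 1, mod_end)
--     starts = [i for i in idx if kind(i) == "psalmody"]
--     exits = [i for i in idx if kind(i) == "exit"]
--     if starts:
--         after = [e for e in exits if e > starts[0]]
--         if after:
--             return after[0]
--     return mod_end
-- ===== Notes on version B (the rewrite author's own statement) =====
-- stated objective: alternative
-- what changed: Replaces A's stateful early-exit scan (in_psalmody flag, dead last_psalmody_line) by a declarative formulation: classify every line of the section into blank/psalmody/exit/other, collect the full lists of psalmody and exit indices with comprehensions, and return the first exit index greater than the first psalmody index.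
-- outside the precondition, e.g. on find_insertion_point_after_psalmody(['psalmody:', 'x'], -1, 5): A returns 1, B raises IndexError
import Mathlib
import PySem

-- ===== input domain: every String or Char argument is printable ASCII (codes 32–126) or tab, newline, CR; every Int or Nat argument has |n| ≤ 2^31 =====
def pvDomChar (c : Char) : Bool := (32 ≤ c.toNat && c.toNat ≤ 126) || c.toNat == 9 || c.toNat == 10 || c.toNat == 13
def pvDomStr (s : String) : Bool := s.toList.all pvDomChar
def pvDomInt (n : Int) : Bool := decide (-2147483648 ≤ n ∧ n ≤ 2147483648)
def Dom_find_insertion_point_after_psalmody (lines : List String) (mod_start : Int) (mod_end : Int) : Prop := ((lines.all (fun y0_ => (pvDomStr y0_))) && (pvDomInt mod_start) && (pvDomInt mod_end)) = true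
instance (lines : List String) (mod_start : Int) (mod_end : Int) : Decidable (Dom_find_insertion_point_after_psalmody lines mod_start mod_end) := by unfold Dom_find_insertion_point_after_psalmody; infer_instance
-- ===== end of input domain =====

-- B replaces A's stateful early-exit scan by a declarative formulation (classify every line,
-- collect all psalmody/exit indices, take the first exit after the first psalmody); same values.
-- ===== PORT A =====
-- line lookup and per-line measures (exact on Pre_: indices in range)
def pvLine (lines : List String) (i : Int) : String := PySem.List.pyGetD lines i ""

def pvIndent (line : String) : Int :=
  (PySem.Str.len line : Int) - (PySem.Str.len (PySem.Str.lstrip line) : Int)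

def pvExitCond (stripped : String) (indent : Int) : Bool :=
  decide (indent ≤ 2) && !PySem.Str.startswith stripped "-" && !PySem.Str.startswith stripped "psalm:" && !PySem.Str.startswith stripped "antiphon:"

-- the for-loop of A, with early return: state = (in_psalmody, last_psalmody_line)
def pvALoop (lines : List String) (mod_end : Int) : List Int → Bool → Int → Int
  | [], _, _ => mod_end
  | i :: rest, in_psalmody, last =>
    let stripped := PySem.Str.strip (pvLine lines i)
    if stripped = "" then pvALoop lines mod_end rest in_psalmody last
    else
      let indent := pvIndent (pvLine lines i)
      if PySem.Str.startswith stripped "psalmody:" then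
        pvALoop lines mod_end rest true i
      else if in_psalmody then
        if pvExitCond stripped indent then i
        else pvALoop lines mod_end rest in_psalmody i
      else pvALoop lines mod_end rest in_psalmody last

def find_insertion_point_after_psalmody (lines : List String) (mod_start : Int) (mod_end : Int) : Int :=
  pvALoop lines mod_end (PySem.List.pyRange (mod_start + 1) mod_end 1) false mod_start

-- ===== PORT B =====
-- B's kind(i): classify a line as blank / psalmody / exit / other
inductive PvKind : Type
  | blank | psd | exitk | other
deriving DecidableEq, Repr

def pvKind (lines : List String) (i : Int) : PvKind :=
  let s := PySem.Str.strip (pvLine lines i)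
  if s = "" then .blank
  else if PySem.Str.startswith s "psalmody:" then .psd
  else if pvExitCond s (pvIndent (pvLine lines i)) then .exitk
  else .other

def find_insertion_point_after_psalmody_alt (lines : List String) (mod_start : Int) (mod_end : Int) : Int :=
  let idx := PySem.List.pyRange (mod_start + 1) mod_end 1
  let starts := idx.filter (fun i => pvKind lines i == PvKind.psd)
  let exits := idx.filter (fun i => pvKind lines i == PvKind.exitk)
  match starts with
  | [] => mod_end
  | p :: _ =>
    match exits.filter (fun e => decide (p < e)) with
    | [] => mod_end
    | e :: _ => e

-- ===== PRECONDITION & SPEC =====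
-- Pre_ excludes ranges reaching past the list, where A's lazy scan may return before hitting the
-- IndexError while B's full-range comprehensions always raise IndexError.
def Pre_find_insertion_point_after_psalmody (lines : List String) (mod_start : Int) (mod_end : Int) : Prop :=
  mod_end ≤ mod_start + 1 ∨ (-(lines.length : Int) ≤ mod_start + 1 ∧ mod_end ≤ (lines.length : Int))
instance (lines : List String) (mod_start : Int) (mod_end : Int) : Decidable (Pre_find_insertion_point_after_psalmody lines mod_start mod_end) := by unfold Pre_find_insertion_point_after_psalmody; infer_instance

def pvWitness_find_insertion_point_after_psalmody : List String × Int × Int :=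
  (["middleOfDay:", "  psalmody:", "    - ps 1", "  prayer:"], 0, 4)

def Spec_find_insertion_point_after_psalmody (lines : List String) (mod_start : Int) (mod_end : Int) (out : Int) : Prop := out = find_insertion_point_after_psalmody_alt lines mod_start mod_end
instance (lines : List String) (mod_start : Int) (mod_end : Int) (out : Int) : Decidable (Spec_find_insertion_point_after_psalmody lines mod_start mod_end out) := by unfold Spec_find_insertion_point_after_psalmody; infer_instance

-- ===== CLAIM (what is proved, stated in full; the proofs are below) =====
def Claim_equal_find_insertion_point_after_psalmody : Prop := ∀ (lines : List String) (mod_start : Int) (mod_end : Int), Dom_find_insertion_point_after_psalmody lines mod_start mod_end → Pre_find_insertion_point_after_psalmody lines mod_start mod_end → Spec_find_insertion_point_after_psalmody lines mod_start mod_end (find_insertion_point_after_psalmody lines mod_start mod_end)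

-- ===== LEMMAS AND PROOFS =====

-- first exit index in a list of indices (else mod_end); the shape B's final match computes
def pvFirstExit (lines : List String) (mod_end : Int) (l : List Int) : Int :=
  match l.filter (fun i => pvKind lines i == PvKind.exitk) with
  | [] => mod_end
  | e :: _ => e

-- unfold pvKind to its if-chain (zeta-reduced form, for rewriting)
theorem pvKind_eq (lines : List String) (i : Int) : pvKind lines i =
    (if PySem.Str.strip (pvLine lines i) = "" then PvKind.blank
     else if PySem.Str.startswith (PySem.Str.strip (pvLine lines i)) "psalmody:" then PvKind.psd
     else if pvExitCond (PySem.Str.strip (pvLine lines i)) (pvIndent (pvLine lines i)) then PvKind.exitk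
     else PvKind.other) := rfl

-- once in_psalmody is true, A's remaining scan returns the first exit index
theorem pvALoop_true_eq_firstExit (lines : List String) (mod_end : Int) (l : List Int) :
    ∀ last, pvALoop lines mod_end l true last = pvFirstExit lines mod_end l := by
  induction l with
  | nil => intro last; rfl
  | cons i rest ih =>
    intro last
    simp only [pvALoop, pvFirstExit, List.filter_cons]
    by_cases h0 : PySem.Str.strip (pvLine lines i) = ""
    · rw [if_pos h0]
      have : pvKind lines i = PvKind.blank := by simp [pvKind, h0]
      simp only [this]
      rw [ih]; rfl
    · rw [if_neg h0]
      by_cases h1 : PySem.Str.startswith (PySem.Str.strip (pvLine lines i)) "psalmody:" = true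
      · rw [if_pos h1]
        have : pvKind lines i = PvKind.psd := by rw [pvKind_eq, if_neg h0, if_pos h1]
        simp only [this]
        rw [ih]; rfl
      · rw [if_neg h1, if_pos trivial]
        by_cases h2 : pvExitCond (PySem.Str.strip (pvLine lines i)) (pvIndent (pvLine lines i)) = true
        · rw [if_pos h2]
          have : pvKind lines i = PvKind.exitk := by rw [pvKind_eq, if_neg h0, if_neg h1, if_pos h2]
          simp only [this]
          rfl
        · rw [if_neg h2]
          have : pvKind lines i = PvKind.other := by rw [pvKind_eq, if_neg h0, if_neg h1, if_neg h2]
          simp only [this]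
          rw [ih]; rfl

-- elements of pyRange a b 1 with a > p are all > p, so the gt-filter keeps them
theorem pvFilterGt_all (p : Int) : ∀ (n : Nat) (a b : Int), (b - a).toNat = n → p < a →
    (PySem.List.pyRange a b 1).filter (fun e => decide (p < e)) = PySem.List.pyRange a b 1 := by
  intro n
  induction n with
  | zero =>
    intro a b ha _
    rw [PySem.List.pyRange_one_eq_nil (by omega)]; rfl
  | succ m ih =>
    intro a b ha hpa
    rcases le_or_gt b a with hba | hab
    · rw [PySem.List.pyRange_one_eq_nil hba]; rfl
    · rw [PySem.List.pyRange_one_cons hab, List.filter_cons, if_pos (by simpa using hpa)]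
      rw [ih (a + 1) b (by omega) (by omega)]

-- the gt-filter of a range starting at or below p+1 is the range from p+1
theorem pvFilterGt (p : Int) : ∀ (n : Nat) (a b : Int), (b - a).toNat = n → a ≤ p + 1 →
    (PySem.List.pyRange a b 1).filter (fun e => decide (p < e)) = PySem.List.pyRange (p + 1) b 1 := by
  intro n
  induction n with
  | zero =>
    intro a b ha hap
    rw [PySem.List.pyRange_one_eq_nil (by omega), PySem.List.pyRange_one_eq_nil (by omega)]
    rfl
  | succ m ih =>
    intro a b ha hap
    rcases le_or_gt b a with hba | hab
    · rw [PySem.List.pyRange_one_eq_nil hba, PySem.List.pyRange_one_eq_nil (by omega)]; rfl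
    · rcases lt_or_eq_of_le hap with hlt | heq
      · rw [PySem.List.pyRange_one_cons hab, List.filter_cons, if_neg (by simp; omega)]
        exact ih (a + 1) b (by omega) (by omega)
      · subst heq
        exact pvFilterGt_all p _ _ b rfl (by omega)

-- before in_psalmody is true, A's scan over range(a, mod_end) equals
-- "first psalmody, then first exit after it"
theorem pvALoop_false_eq (lines : List String) (mod_end : Int) :
    ∀ (n : Nat) (a : Int), (mod_end - a).toNat = n → ∀ last,
      pvALoop lines mod_end (PySem.List.pyRange a mod_end 1) false last =
        (match (PySem.List.pyRange a mod_end 1).filter (fun i => pvKind lines i == PvKind.psd) with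
         | [] => mod_end
         | p :: _ => pvFirstExit lines mod_end (PySem.List.pyRange (p + 1) mod_end 1)) := by
  intro n
  induction n with
  | zero =>
    intro a ha last
    rw [PySem.List.pyRange_one_eq_nil (by omega)]
    rfl
  | succ m ih =>
    intro a ha last
    rcases le_or_gt mod_end a with hba | hab
    · rw [PySem.List.pyRange_one_eq_nil hba]; rfl
    · rw [PySem.List.pyRange_one_cons hab]
      simp only [pvALoop, List.filter_cons]
      by_cases h0 : PySem.Str.strip (pvLine lines a) = ""
      · rw [if_pos h0]
        have : pvKind lines a = PvKind.blank := by simp [pvKind, h0]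
        simp only [this]
        rw [ih (a + 1) (by omega) last]; rfl
      · rw [if_neg h0]
        by_cases h1 : PySem.Str.startswith (PySem.Str.strip (pvLine lines a)) "psalmody:" = true
        · rw [if_pos h1]
          have : pvKind lines a = PvKind.psd := by rw [pvKind_eq, if_neg h0, if_pos h1]
          simp only [this]
          rw [pvALoop_true_eq_firstExit]
          rfl
        · rw [if_neg h1, if_neg (by simp)]
          have hk : pvKind lines a ≠ PvKind.psd := by
            rw [pvKind_eq, if_neg h0, if_neg h1]
            split <;> simp
          simp only [beq_iff_eq, if_neg hk]
          exact ih (a + 1) (by omega) last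

-- ===== VERDICT (by name: the statement is the Claim_ definition above) =====
theorem find_insertion_point_after_psalmody_spec : Claim_equal_find_insertion_point_after_psalmody := by
  intro lines mod_start mod_end _ _
  unfold Spec_find_insertion_point_after_psalmody find_insertion_point_after_psalmody find_insertion_point_after_psalmody_alt
  rw [pvALoop_false_eq lines mod_end _ (mod_start + 1) rfl mod_start]
  cases hs : (PySem.List.pyRange (mod_start + 1) mod_end 1).filter (fun i => pvKind lines i == PvKind.psd) with
  | nil => simp only [hs]
  | cons p rest =>
    have hp : p ∈ PySem.List.pyRange (mod_start + 1) mod_end 1 :=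
      List.mem_of_mem_filter (hs ▸ List.mem_cons_self ..)
    have hle : mod_start + 1 ≤ p := ((PySem.List.mem_pyRange_one).1 hp).1
    simp only [hs]
    rw [List.filter_comm, pvFilterGt p _ (mod_start + 1) mod_end rfl (by omega)]
    rfl

theorem pvWitness_ok : Dom_find_insertion_point_after_psalmody pvWitness_find_insertion_point_after_psalmody.1 pvWitness_find_insertion_point_after_psalmody.2.1 pvWitness_find_insertion_point_after_psalmody.2.2 ∧ Pre_find_insertion_point_after_psalmody pvWitness_find_insertion_point_after_psalmody.1 pvWitness_find_insertion_point_after_psalmody.2.1 pvWitness_find_insertion_point_after_psalmody.2.2 := by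
  constructor <;> decide
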